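-- pv_equiv track=rewrite | github.com/Herwal/Waterman-smith-binf | henrikVer.py | get_max_score_indices
-- ===== SOURCE A (Python) =====
-- def get_max_score_indices(table: list[list[int]]) -> tuple[list[tuple[int, int]], int]:
--     """
--     Returns the indices of the maximum score(s) in the given table.
--
--     Args:
--         table (list): A 2D list representing the table of scores.
--
--     Returns:
--         tuple: A tuple containing a list of indices and the maximum score.
--     """
--     max_score = float("-inf")
--     max_indices = []
--     for i in range(len(table)):
--         for j in range(len(table[i])):
--             if table[i][j] == max_score:
--                 max_indices.append((i, j))
--             elif table[i][j] > max_score: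
--                 max_score = table[i][j]
--                 max_indices = [(i, j)]
--     return max_indices, max_score
-- ===== SOURCE B (Python) =====
-- def get_max_score_indices(table: list[list[int]]) -> tuple[list[tuple[int, int]], int]:
--     flat = [v for row in table for v in row]
--     m = max(flat)
--     indices = [(i, j) for i, row in enumerate(table) for j, v in enumerate(row) if v == m]
--     return indices, m
-- ===== Notes on version B (the rewrite author's own statement) =====
-- stated objective: simpler
-- what changed: Replaces the single stateful nested loop that maintains a running max and rebuilds/extends the index list on the fly with two stateless passes: first the maximum of all cells (max over a flattened list), then one comprehension collecting every (i,j) equal to it.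
-- outside the precondition, e.g. on get_max_score_indices([[]]): A returns ([], -inf), B raises ValueError; on get_max_score_indices([]): A returns ([], -inf), B raises ValueError
import Mathlib
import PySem

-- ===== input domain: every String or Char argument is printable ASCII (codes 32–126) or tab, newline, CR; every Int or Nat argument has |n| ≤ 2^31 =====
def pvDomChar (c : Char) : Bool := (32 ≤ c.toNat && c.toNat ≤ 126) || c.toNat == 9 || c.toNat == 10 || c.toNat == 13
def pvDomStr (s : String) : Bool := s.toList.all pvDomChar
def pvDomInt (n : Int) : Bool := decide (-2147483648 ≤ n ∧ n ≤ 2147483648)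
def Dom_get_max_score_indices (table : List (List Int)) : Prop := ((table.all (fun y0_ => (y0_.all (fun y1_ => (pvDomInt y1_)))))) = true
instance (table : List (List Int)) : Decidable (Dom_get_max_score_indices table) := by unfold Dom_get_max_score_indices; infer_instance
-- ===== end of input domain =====

-- B replaces A's single stateful running-max loop by two stateless passes (max, then a comprehension); simpler, same cost.

-- ===== PORT A =====
-- loop body of A's inner `for j` loop: `none` stands for the float('-inf') sentinel
-- (an int cell is never == -inf and always > -inf, so the first cell always takes the elif branch)
def stepA (st : (List (Int × Int)) × Option Int) (q : (Int × Int) × Int) :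
    (List (Int × Int)) × Option Int :=
  match st.2 with
  | none => ([q.1], some q.2)
  | some m =>
      if q.2 = m then (st.1 ++ [q.1], some m)
      else if m < q.2 then ([q.1], some q.2)
      else st

def get_max_score_indices (table : List (List Int)) : (List (Int × Int)) × Int :=
  let st := (PySem.List.pyRange 0 (PySem.List.len table)).foldl
    (fun st i =>
      let row := PySem.List.pyGetD table i []
      (PySem.List.pyRange 0 (PySem.List.len row)).foldl
        (fun st j => stepA st ((i, j), PySem.List.pyGetD row j 0)) st)
    ([], none)
  -- Python returns float('-inf') when st.2 = none; that input is excluded by Pre_, `.getD 0` only totalizes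
  (st.1, st.2.getD 0)

-- ===== PORT B =====
def get_max_score_indices_alt (table : List (List Int)) : (List (Int × Int)) × Int :=
  let flat := table.flatten
  match PySem.List.max? flat (fun y => y) with
  | none => ([], 0)   -- max([]) raises ValueError in Python B; excluded by Pre_
  | some m =>
      let indices := (PySem.List.enumerate table).flatMap (fun p =>
        (PySem.List.enumerate p.2).filterMap (fun q =>
          if q.2 = m then some (p.1, q.1) else none))
      (indices, m)

-- ===== PRECONDITION & SPEC =====
-- Pre_ excludes tables with no cells at all: there Python A returns ([], float('-inf')),
-- a float outside the declared int return type, and Python B raises ValueError.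
def Pre_get_max_score_indices (table : List (List Int)) : Prop := table.flatten ≠ []
instance (table : List (List Int)) : Decidable (Pre_get_max_score_indices table) := by
  unfold Pre_get_max_score_indices; infer_instance
def pvWitness_get_max_score_indices : List (List Int) := [[1]]

def Spec_get_max_score_indices (table : List (List Int)) (out : (List (Int × Int)) × Int) : Prop := out = get_max_score_indices_alt table
instance (table : List (List Int)) (out : (List (Int × Int)) × Int) : Decidable (Spec_get_max_score_indices table out) := by unfold Spec_get_max_score_indices; infer_instance

-- ===== CLAIM (what is proved, stated in full; the proofs are below) =====
def Claim_equal_get_max_score_indices : Prop := ∀ (table : List (List Int)), Dom_get_max_score_indices table → Pre_get_max_score_indices table → Spec_get_max_score_indices table (get_max_score_indices table)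

-- ===== LEMMAS AND PROOFS =====

-- running max of a nonempty list of values (0 on [] is never used under Pre_)
def vmax : List Int → Int
  | [] => 0
  | x :: xs => xs.foldl max x

theorem vmax_append_singleton (l : List Int) (h : l ≠ []) (v : Int) :
    vmax (l ++ [v]) = max (vmax l) v := by
  cases l with
  | nil => exact absurd rfl h
  | cons x xs => simp [vmax, List.foldl_append]

theorem mem_le_vmax (l : List Int) (x : Int) (hx : x ∈ l) : x ≤ vmax l := by
  cases l with
  | nil => cases hx
  | cons a t =>
    rcases List.mem_cons.mp hx with h | h
    · subst h; exact (PySem.List.le_foldl_max t x).1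
    · exact (PySem.List.le_foldl_max t a).2 x h

-- a nested fold is a fold over the flattened list
theorem foldl_flatMap_eq {α β σ : Type} (g : α → List β) (f : σ → β → σ) :
    ∀ (l : List α) (init : σ),
      (l.flatMap g).foldl f init = l.foldl (fun st x => (g x).foldl f st) init := by
  intro l
  induction l with
  | nil => intro init; simp
  | cons a t ih => intro init; simp [List.flatMap_cons, List.foldl_append, ih]

-- the invariant of A's loop over any nonempty list of ((i,j), value) pairs
theorem foldA_eq (ps : List ((Int × Int) × Int)) (h : ps ≠ []) :
    ps.foldl stepA ([], none) =
      (ps.filterMap (fun q => if q.2 = vmax (ps.map Prod.snd) then some q.1 else none),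
       some (vmax (ps.map Prod.snd))) := by
  induction ps using List.reverseRecOn with
  | nil => exact absurd rfl h
  | append_singleton l q ih =>
    by_cases hl : l = []
    · subst hl; simp [stepA, vmax]
    · have hm : vmax ((l ++ [q]).map Prod.snd) = max (vmax (l.map Prod.snd)) q.2 := by
        rw [List.map_append]
        exact vmax_append_singleton _ (by simpa using hl) q.2
      rw [List.foldl_append, ih hl, hm]
      set m := vmax (l.map Prod.snd) with hmdef
      by_cases h1 : q.2 = m
      · have hmx : max m q.2 = m := by omega
        rw [hmx]
        simp [stepA, h1, List.filterMap_append]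
      · by_cases h2 : m < q.2
        · have hmx : max m q.2 = q.2 := by omega
          rw [hmx]
          have hnil : l.filterMap (fun p => if p.2 = q.2 then some p.1 else none) = [] := by
            rw [List.filterMap_eq_nil_iff]
            intro a ha
            have : a.2 ≤ m := mem_le_vmax _ _ (List.mem_map_of_mem ha)
            simp only [ite_eq_right_iff]
            intro hq; omega
          simp [stepA, h1, h2, List.filterMap_append, hnil]
        · have h3 : q.2 < m := by omega
          have hmx : max m q.2 = m := by omega
          rw [hmx]
          simp [stepA, h1, h2, List.filterMap_append]

-- A's nested fold, rewritten as a fold over the flattened enumerated pairs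
def pairsOf (table : List (List Int)) : List ((Int × Int) × Int) :=
  (PySem.List.enumerate table).flatMap (fun p =>
    (PySem.List.enumerate p.2).map (fun q => ((p.1, q.1), q.2)))

theorem portA_eq_foldA (table : List (List Int)) :
    get_max_score_indices table =
      (((pairsOf table).foldl stepA ([], none)).1,
       ((pairsOf table).foldl stepA ([], none)).2.getD 0) := by
  unfold get_max_score_indices pairsOf
  rw [foldl_flatMap_eq]
  show ((((PySem.List.pyRange 0 (PySem.List.len table)).foldl
      (fun st i =>
        let row := PySem.List.pyGetD table i []
        (PySem.List.pyRange 0 (PySem.List.len row)).foldl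
          (fun st j => stepA st ((i, j), PySem.List.pyGetD row j 0)) st)
      (([], none) : (List (Int × Int)) × Option Int))).1, _) = _
  rw [PySem.List.enumerate_eq_map_pyRange table ([] : List Int), List.foldl_map]
  have hfun : (fun (st : (List (Int × Int)) × Option Int) (i : Int) =>
      let row := PySem.List.pyGetD table i []
      (PySem.List.pyRange 0 (PySem.List.len row)).foldl
        (fun st j => stepA st ((i, j), PySem.List.pyGetD row j 0)) st)
    = (fun st i => List.foldl stepA st
        ((PySem.List.enumerate (PySem.List.pyGetD table i [])).map
          (fun q => ((i, q.1), q.2)))) := by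
    funext st i
    show (PySem.List.pyRange 0 (PySem.List.len (PySem.List.pyGetD table i []))).foldl
        (fun st j => stepA st ((i, j), PySem.List.pyGetD (PySem.List.pyGetD table i []) j 0)) st = _
    rw [PySem.List.enumerate_eq_map_pyRange (PySem.List.pyGetD table i []) 0,
        List.foldl_map, List.foldl_map]
  rw [hfun]

theorem map_snd_pairsOf_aux (table : List (List Int)) :
    ∀ (s : Int), ((PySem.List.enumerate table s).flatMap (fun p =>
      (PySem.List.enumerate p.2).map (fun q => ((p.1, q.1), q.2)))).map Prod.snd
      = table.flatten := by
  induction table with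
  | nil => intro s; simp [PySem.List.enumerate_nil]
  | cons r t ih =>
    intro s
    rw [PySem.List.enumerate_cons, List.flatMap_cons, List.map_append, ih]
    rw [List.map_map]
    have : (Prod.snd ∘ fun q : Int × Int => (((s, r).1, q.1), q.2)) = (fun x => x.2) := by
      funext q; rfl
    rw [this, PySem.List.map_snd_enumerate]
    rfl

theorem map_snd_pairsOf (table : List (List Int)) :
    (pairsOf table).map Prod.snd = table.flatten :=
  map_snd_pairsOf_aux table 0

theorem pairsOf_ne_nil (table : List (List Int)) (h : table.flatten ≠ []) :
    pairsOf table ≠ [] := by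
  intro hc
  apply h
  rw [← map_snd_pairsOf, hc, List.map_nil]

-- ===== VERDICT (by name: the statement is the Claim_ definition above) =====
theorem get_max_score_indices_spec : Claim_equal_get_max_score_indices := by
  intro table _ hpre
  unfold Spec_get_max_score_indices
  obtain ⟨x, xs, hflat⟩ : ∃ x xs, table.flatten = x :: xs := by
    cases hfl : table.flatten with
    | nil => exact absurd hfl hpre
    | cons a t => exact ⟨a, t, rfl⟩
  have hA := portA_eq_foldA table
  rw [foldA_eq _ (pairsOf_ne_nil table hpre)] at hA
  rw [map_snd_pairsOf] at hA
  unfold get_max_score_indices_alt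
  simp only [hflat, PySem.List.max?_id_cons]
  have hm : xs.foldl max x = vmax table.flatten := by rw [hflat]; rfl
  rw [hm, hA]
  refine Prod.ext ?_ rfl
  show (pairsOf table).filterMap (fun q => if q.2 = vmax table.flatten then some q.1 else none)
      = (PySem.List.enumerate table).flatMap (fun p =>
          (PySem.List.enumerate p.2).filterMap (fun q =>
            if q.2 = vmax table.flatten then some (p.1, q.1) else none))
  unfold pairsOf
  rw [List.filterMap_flatMap]
  congr 1
  funext p
  rw [List.filterMap_map]
  rfl
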